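-- pv_equiv track=rewrite | github.com/miliar/Code_Jam_Webscraper | solutions_python/solutions_year17_round1_nr1/84.py | fillLine
-- ===== SOURCE A (Python) =====
-- def fillLine(line): # line must not be blank
--     l = len(line)
--     currChar = '.' # none
--     haveEncountedFirstChar = False
--     for i in range(0, l):
--         if line[i] != '?':
--             currChar = line[i]
--             if not haveEncountedFirstChar:
--                 for j in range(0,i):
--                     line = line[:j] + currChar + line[(j+1):]
--                 haveEncountedFirstChar = True
--         else:
--             if haveEncountedFirstChar:
--                 line = line[:i] + currChar + line[(i+1):]
--     return line
-- ===== SOURCE B (Python) =====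
-- def fillLine(line):
--     # Segment view: each non-'?' char covers the run of '?' that follows it,
--     # and the first non-'?' char also covers the leading '?' run.
--     ks = [i for i, c in enumerate(line) if c != '?']
--     if not ks:
--         return line
--     parts = [line[ks[0]] * ks[0]]
--     for idx in range(len(ks)):
--         a = ks[idx]
--         b = ks[idx + 1] if idx + 1 < len(ks) else len(line)
--         parts.append(line[a] * (b - a))
--     return ''.join(parts)
-- ===== Notes on version B (the rewrite author's own statement) =====
-- stated objective: alternative
-- what changed: B first collects the positions of all known (non-question-mark) characters, then rebuilds the line as run-length segments (each known char replicated up to the next known position, the first one also covering the leading run of unknowns), instead of A's stateful per-index scan that re-slices the whole string for every unknown it fills.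
import Mathlib
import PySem

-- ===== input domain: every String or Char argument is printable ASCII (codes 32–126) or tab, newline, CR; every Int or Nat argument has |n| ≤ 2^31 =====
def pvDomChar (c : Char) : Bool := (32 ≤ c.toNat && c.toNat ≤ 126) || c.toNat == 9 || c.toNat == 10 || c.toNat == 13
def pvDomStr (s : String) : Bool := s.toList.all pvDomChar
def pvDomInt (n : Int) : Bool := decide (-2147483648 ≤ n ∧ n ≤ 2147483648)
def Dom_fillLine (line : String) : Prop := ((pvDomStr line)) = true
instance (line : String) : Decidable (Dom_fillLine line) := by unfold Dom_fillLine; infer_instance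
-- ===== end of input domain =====

-- B rebuilds the line from the positions of the non-'?' characters as run-length segments
-- (each known char replicated up to the next known position, the first one also covering the
-- leading '?' run), instead of A's per-index scan with repeated string re-slicing
-- (objective: alternative).

-- ===== PORT A =====
-- line = line[:j] + c + line[(j+1):]  — one slicing assignment of A
def pvSetStep (ln : List Char) (c : Char) (j : Int) : List Char :=
  PySem.List.slice ln none (some j) ++ [c] ++ PySem.List.slice ln (some (j + 1)) none

-- one iteration of A's outer 'for i in range(0, l)' loop, state (line, currChar, haveEncountedFirstChar)
def pvStepA (st : List Char × Char × Bool) (i : Int) : List Char × Char × Bool :=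
  let ln := st.1
  let cur := st.2.1
  let enc := st.2.2
  -- line[i]: i is always in range in the Python (0 ≤ i < len(line), length preserved), so the '?' default is unreachable
  let ci := (PySem.List.pyGet? ln i).getD '?'
  if ci ≠ '?' then
    (if ¬ enc then (PySem.List.pyRange 0 i 1).foldl (fun l2 j => pvSetStep l2 ci j) ln else ln, ci, true)
  else
    if enc then (pvSetStep ln cur i, cur, enc) else (ln, cur, enc)

def fillLine (line : String) : String :=
  String.ofList
    ((PySem.List.pyRange 0 (line.toList.length : Int) 1).foldl pvStepA (line.toList, '.', false)).1

-- ===== PORT B =====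
-- ks = [i for i, c in enumerate(line) if c != '?']
def pvKs (xs : List Char) : List Nat :=
  (xs.zipIdx.filter (fun p => p.1 ≠ '?')).map Prod.snd

-- B's loop over ks: for each known index a, the segment line[a] * (b - a) where b is the
-- next known index (or len(line)); indices are always in range, so the '?' default of
-- getElem? is unreachable
def pvSegJoin (xs : List Char) (n : Nat) : List Nat → List Char
  | [] => []
  | [a] => List.replicate (n - a) ((xs[a]?).getD '?')
  | a :: b :: rest => List.replicate (b - a) ((xs[a]?).getD '?') ++ pvSegJoin xs n (b :: rest)

def fillLine_alt (line : String) : String :=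
  let xs := line.toList
  match pvKs xs with
  | [] => line
  | k0 :: _ =>
    String.ofList (List.replicate k0 ((xs[k0]?).getD '?') ++ pvSegJoin xs xs.length (pvKs xs))

-- ===== PRECONDITION & SPEC =====
def Spec_fillLine (line : String) (out : String) : Prop := out = fillLine_alt line
instance (line : String) (out : String) : Decidable (Spec_fillLine line out) := by unfold Spec_fillLine; infer_instance

-- ===== CLAIM (what is proved, stated in full; the proofs are below) =====
def Claim_equal_fillLine : Prop := ∀ (line : String), Dom_fillLine line → Spec_fillLine line (fillLine line)

-- ===== LEMMAS AND PROOFS =====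

-- proof-side forward-fill characterisation of A's loop result
def pvFF : Option Char → List Char → List Char
  | _, [] => []
  | prev, c :: cs =>
    if c = '?' then
      match prev with
      | some p => p :: pvFF prev cs
      | none => c :: pvFF prev cs
    else c :: pvFF (some c) cs

def pvLead (f : Char) : List Char → List Char
  | [] => []
  | c :: cs => if c ≠ '?' then c :: cs else f :: pvLead f cs

def pvB (xs : List Char) : List Char :=
  let ff := pvFF none xs
  match ff.find? (fun c => c ≠ '?') with
  | some f => pvLead f ff
  | none => ff

-- last non-'?' char seen so far
def pvLastNQ (prev : Option Char) : List Char → Option Char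
  | [] => prev
  | c :: cs => pvLastNQ (if c = '?' then prev else some c) cs

theorem pvSetStep_eq_set (l : List Char) (c : Char) (j : Nat) (h : j < l.length) :
    pvSetStep l c (j : Int) = l.set j c := by
  have h1 : ((j : Int) + 1) = ((j + 1 : Nat) : Int) := by push_cast; ring
  rw [pvSetStep, h1, PySem.List.slice_to_natCast, PySem.List.slice_from_natCast]
  simpa using (List.set_eq_take_cons_drop c h).symm

theorem pvBackfill (xs : List Char) (c : Char) (k : Nat) (hk : k ≤ xs.length) :
    (PySem.List.pyRange 0 (k : Int) 1).foldl (fun l2 j => pvSetStep l2 c j) xs =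
      List.replicate k c ++ xs.drop k := by
  induction k with
  | zero => simp [PySem.List.pyRange]
  | succ k ih =>
    have hk' : k ≤ xs.length := Nat.le_of_succ_le hk
    have hkl : k < xs.length := hk
    have hcast : ((k + 1 : Nat) : Int) = (k : Int) + 1 := by push_cast; ring
    rw [hcast, PySem.List.pyRange_one_succ_right (by positivity), List.foldl_append, ih hk']
    rw [List.foldl_cons, List.foldl_nil]
    have hlen : k < (List.replicate k c ++ xs.drop k).length := by
      simp [List.length_replicate, List.length_drop]; omega
    rw [pvSetStep_eq_set _ _ _ hlen]
    rw [List.set_append]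
    simp only [List.length_replicate]
    rw [if_neg (lt_irrefl k)]
    simp only [Nat.sub_self]
    rw [List.drop_eq_getElem_cons hkl, List.set_cons_zero]
    simp [List.replicate_succ']

theorem pvFF_all_q (ys : List Char) (h : ∀ c ∈ ys, c = '?') : pvFF none ys = ys := by
  induction ys with
  | nil => rfl
  | cons c cs ih =>
    have hc : c = '?' := h c (by simp)
    simp [pvFF, hc, ih (fun c hc => h c (by simp [hc]))]

theorem pvLastNQ_snoc (prev : Option Char) (ys : List Char) (c : Char) :
    pvLastNQ prev (ys ++ [c]) = if c = '?' then pvLastNQ prev ys else some c := by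
  induction ys generalizing prev with
  | nil => by_cases hc : c = '?' <;> simp [pvLastNQ, hc]
  | cons a as ih => simp [pvLastNQ, ih]

theorem pvLastNQ_some_isSome (ys : List Char) (p : Char) : (pvLastNQ (some p) ys).isSome := by
  induction ys generalizing p with
  | nil => rfl
  | cons a as ih => by_cases ha : a = '?' <;> simp [pvLastNQ, ha, ih]

theorem pvLastNQ_isSome (ys : List Char) (h : ∃ a ∈ ys, a ≠ '?') : (pvLastNQ none ys).isSome := by
  induction ys with
  | nil => simp at h
  | cons a as ih =>
    by_cases ha : a = '?'
    · obtain ⟨b, hb, hbq⟩ := h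
      rcases List.mem_cons.mp hb with rfl | hb'
      · exact absurd ha hbq
      · simpa [pvLastNQ, ha] using ih ⟨b, hb', hbq⟩
    · simpa [pvLastNQ, ha] using pvLastNQ_some_isSome as a

theorem pvFF_snoc (prev : Option Char) (ys : List Char) (c : Char) :
    pvFF prev (ys ++ [c]) =
      pvFF prev ys ++ [if c = '?' then (pvLastNQ prev ys).getD '?' else c] := by
  induction ys generalizing prev with
  | nil => cases prev <;> by_cases hc : c = '?' <;> simp [pvFF, pvLastNQ, hc]
  | cons a as ih =>
    by_cases ha : a = '?'
    · cases prev <;> simp [pvFF, pvLastNQ, ha, ih]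
    · simp [pvFF, pvLastNQ, ha, ih]

theorem pvFF_find?_none (ys : List Char) :
    (pvFF none ys).find? (fun c => c ≠ '?') = ys.find? (fun c => c ≠ '?') := by
  induction ys with
  | nil => rfl
  | cons a as ih =>
    by_cases ha : a = '?'
    · simp only [pvFF, ha, if_pos]
      simp [List.find?]
      simpa using ih
    · simp [pvFF, ha, List.find?]

theorem pvLead_snoc (f : Char) (ys : List Char) (c : Char) (h : ∃ a ∈ ys, a ≠ '?') :
    pvLead f (ys ++ [c]) = pvLead f ys ++ [c] := by
  induction ys with
  | nil => simp at h
  | cons a as ih =>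
    by_cases ha : a = '?'
    · obtain ⟨b, hb, hbq⟩ := h
      rcases List.mem_cons.mp hb with rfl | hb'
      · exact absurd ha hbq
      · simp [pvLead, ha, ih ⟨b, hb', hbq⟩]
    · simp [pvLead, ha]

theorem pvLead_all_q_snoc (f c : Char) (ys : List Char) (hq : ∀ a ∈ ys, a = '?') (hc : c ≠ '?') :
    pvLead f (ys ++ [c]) = List.replicate ys.length f ++ [c] := by
  induction ys with
  | nil => simp [pvLead, hc]
  | cons a as ih =>
    have ha : a = '?' := hq a (by simp)
    simp [pvLead, ha, List.replicate_succ, ih (fun b hb => hq b (by simp [hb]))]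

theorem pvB_all_q (ys : List Char) (h : ∀ c ∈ ys, c = '?') : pvB ys = ys := by
  have hf : ys.find? (fun c => c ≠ '?') = none := by
    rw [List.find?_eq_none]; intro c hc; simp [h c hc]
  simp only [pvB]
  rw [pvFF_all_q ys h, hf]

theorem pvB_snoc_first (ys : List Char) (c : Char) (hq : ∀ a ∈ ys, a = '?') (hc : c ≠ '?') :
    pvB (ys ++ [c]) = List.replicate ys.length c ++ [c] := by
  have hff : pvFF none (ys ++ [c]) = ys ++ [c] := by
    rw [pvFF_snoc]; simp [hc, pvFF_all_q ys hq]
  have hfys : ys.find? (fun a => a ≠ '?') = none := by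
    rw [List.find?_eq_none]; intro a ha; simp [hq a ha]
  have hfind : (ys ++ [c]).find? (fun a => a ≠ '?') = some c := by
    rw [List.find?_append, hfys]; simp [List.find?, hc]
  simp only [pvB]
  rw [hff, hfind]
  exact pvLead_all_q_snoc c c ys hq hc

theorem pvB_snoc (ys : List Char) (c : Char) (h : ∃ a ∈ ys, a ≠ '?') :
    pvB (ys ++ [c]) = pvB ys ++ [if c = '?' then (pvLastNQ none ys).getD '?' else c] := by
  obtain ⟨b, hb, hbq⟩ := h
  cases hfind : ys.find? (fun a => a ≠ '?') with
  | none =>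
    rw [List.find?_eq_none] at hfind
    exact absurd (by simp [hbq]) (hfind b hb)
  | some f =>
    have hffind : (pvFF none ys).find? (fun a => a ≠ '?') = some f :=
      (pvFF_find?_none ys).trans hfind
    have hmem : ∃ a ∈ pvFF none ys, a ≠ '?' :=
      ⟨f, List.mem_of_find?_eq_some hffind, by simpa using List.find?_some hffind⟩
    simp only [pvB]
    rw [pvFF_snoc, List.find?_append, hffind, Option.some_or]
    exact pvLead_snoc f _ _ hmem

theorem pvFF_length (prev : Option Char) (ys : List Char) : (pvFF prev ys).length = ys.length := by
  induction ys generalizing prev with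
  | nil => rfl
  | cons a as ih =>
    by_cases ha : a = '?'
    · cases prev <;> simp [pvFF, ha, ih]
    · simp [pvFF, ha, ih]

theorem pvLead_length (f : Char) (ys : List Char) : (pvLead f ys).length = ys.length := by
  induction ys with
  | nil => rfl
  | cons a as ih => by_cases ha : a = '?' <;> simp [pvLead, ha, ih]

theorem pvB_length (ys : List Char) : (pvB ys).length = ys.length := by
  simp only [pvB]
  cases hf : (pvFF none ys).find? (fun c => c ≠ '?') with
  | none => exact pvFF_length none ys
  | some f => rw [pvLead_length, pvFF_length]

-- invariant of A's outer loop: after k steps, line = pvB of the first k chars ++ rest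
set_option maxRecDepth 8192 in
theorem pvLoopInv (xs : List Char) (k : Nat) (hk : k ≤ xs.length) :
    (PySem.List.pyRange 0 (k : Int) 1).foldl pvStepA (xs, '.', false) =
      if ∀ c ∈ xs.take k, c = '?' then (xs, '.', false)
      else (pvB (xs.take k) ++ xs.drop k, (pvLastNQ none (xs.take k)).getD '.', true) := by
  induction k with
  | zero => simp [PySem.List.pyRange]
  | succ k ih =>
    have hk' : k ≤ xs.length := Nat.le_of_succ_le hk
    have hkl : k < xs.length := hk
    have hcast : ((k + 1 : Nat) : Int) = (k : Int) + 1 := by push_cast; ring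
    have htake : xs.take (k + 1) = xs.take k ++ [xs[k]] := by
      rw [List.take_succ]; simp [List.getElem?_eq_getElem hkl]
    have hlentk : (xs.take k).length = k := by rw [List.length_take]; omega
    rw [hcast, PySem.List.pyRange_one_succ_right (by positivity), List.foldl_append, ih hk']
    rw [List.foldl_cons, List.foldl_nil]
    by_cases hq : ∀ c ∈ xs.take k, c = '?'
    · rw [if_pos hq]
      by_cases hc : xs[k] = '?'
      · have hall : ∀ c ∈ xs.take (k + 1), c = '?' := by
          intro c hcmem
          rw [htake] at hcmem
          rcases List.mem_append.mp hcmem with h1 | h1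
          · exact hq c h1
          · rw [List.mem_singleton.mp h1]; exact hc
        rw [if_pos hall]
        simp [pvStepA, PySem.List.pyGet?_natCast, List.getElem?_eq_getElem hkl, hc]
      · have hnall : ¬ ∀ c ∈ xs.take (k + 1), c = '?' := by
          intro h
          exact hc (h xs[k] (htake ▸ List.mem_append_right _ (by simp)))
        rw [if_neg hnall]
        simp only [pvStepA, PySem.List.pyGet?_natCast, List.getElem?_eq_getElem hkl,
          Option.getD_some]
        rw [if_pos hc, if_pos (by simp)]
        rw [pvBackfill xs _ k hk']
        rw [htake, pvB_snoc_first _ _ hq hc, hlentk, pvLastNQ_snoc, if_neg hc]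
        rw [List.append_assoc, List.singleton_append, List.drop_eq_getElem_cons hkl]
        simp
    · rw [if_neg hq]
      push_neg at hq
      have hex : ∃ a ∈ xs.take k, a ≠ '?' := hq
      have hnall : ¬ ∀ c ∈ xs.take (k + 1), c = '?' := by
        intro h
        obtain ⟨a, ha, hne⟩ := hex
        exact hne (h a (htake ▸ List.mem_append_left _ ha))
      rw [if_neg hnall]
      have hlen1 : (pvB (xs.take k)).length = k := by rw [pvB_length, hlentk]
      have hget : (pvB (xs.take k) ++ xs.drop k)[k]? = some xs[k] := by
        rw [List.getElem?_append_right (hlen1.le), hlen1, Nat.sub_self,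
          List.getElem?_drop, Nat.add_zero, List.getElem?_eq_getElem hkl]
      by_cases hc : xs[k] = '?'
      · obtain ⟨p, hp⟩ : ∃ p, pvLastNQ none (xs.take k) = some p :=
          Option.isSome_iff_exists.mp (pvLastNQ_isSome _ hex)
        simp only [pvStepA, PySem.List.pyGet?_natCast, hget, Option.getD_some]
        rw [if_neg (by simpa using hc), if_pos trivial]
        have hlen2 : k < (pvB (xs.take k) ++ xs.drop k).length := by
          rw [List.length_append, hlen1, List.length_drop]; omega
        rw [pvSetStep_eq_set _ _ _ hlen2, List.set_append, hlen1]
        rw [if_neg (lt_irrefl k), Nat.sub_self]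
        rw [List.drop_eq_getElem_cons hkl, List.set_cons_zero]
        rw [htake, hc, pvB_snoc _ _ hex, pvLastNQ_snoc, if_pos rfl, hp]
        simp
      · simp only [pvStepA, PySem.List.pyGet?_natCast, hget, Option.getD_some]
        rw [if_pos hc, if_neg (by simp)]
        rw [htake, pvB_snoc _ _ hex, if_neg hc, pvLastNQ_snoc, if_neg hc]
        rw [List.append_assoc, List.singleton_append, List.drop_eq_getElem_cons hkl]
        simp

-- ===== bridge: pvB (A's result) = B's segment construction =====

theorem pvKs_snoc (xs : List Char) (c : Char) :
    pvKs (xs ++ [c]) = pvKs xs ++ if c = '?' then [] else [xs.length] := by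
  by_cases hc : c = '?' <;>
    simp [pvKs, List.zipIdx_append, List.filter_append, List.map_append, hc]

theorem pvKs_mem_lt (xs : List Char) (k : Nat) (h : k ∈ pvKs xs) : k < xs.length := by
  simp only [pvKs, List.mem_map, List.mem_filter] at h
  obtain ⟨⟨a, i⟩, ⟨hmem, _⟩, rfl⟩ := h
  have := List.mem_zipIdx hmem
  omega

theorem pvKs_nil_iff (xs : List Char) : pvKs xs = [] ↔ ∀ c ∈ xs, c = '?' := by
  simp only [pvKs, List.map_eq_nil_iff, List.filter_eq_nil_iff]
  constructor
  · intro h c hc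
    obtain ⟨i, hi, hget⟩ := List.mem_iff_getElem.mp hc
    have : (c, i) ∈ xs.zipIdx := by
      rw [List.mem_zipIdx_iff_getElem?]
      simp [List.getElem?_eq_getElem hi, hget]
    simpa using h _ this
  · intro h p hp
    have := List.mem_zipIdx hp
    simp only [Nat.zero_le, Nat.zero_add, true_and] at this
    obtain ⟨hlt, heq⟩ := this
    have : p.1 ∈ xs := heq ▸ List.getElem_mem _
    simp [h _ this]

theorem pvLastNQ_ks (xs : List Char) :
    pvLastNQ none xs = (pvKs xs).getLast?.bind (fun k => xs[k]?) := by
  induction xs using List.reverseRecOn with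
  | nil => rfl
  | append_singleton xs c ih =>
    rw [pvLastNQ_snoc, pvKs_snoc]
    by_cases hc : c = '?'
    · rw [if_pos hc, if_pos hc, List.append_nil, ih]
      cases hlast : (pvKs xs).getLast? with
      | none => rfl
      | some k =>
        have hk : k < xs.length := pvKs_mem_lt xs k (List.mem_of_getLast? hlast)
        simp [List.getElem?_append_left hk]
    · rw [if_neg hc, if_neg hc, List.getLast?_append]
      simp [List.getElem?_append_right (le_refl xs.length)]

theorem pvSegJoin_snoc_known (xs : List Char) (c : Char) (ks : List Nat)
    (hlt : ∀ a ∈ ks, a < xs.length) :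
    pvSegJoin (xs ++ [c]) (xs.length + 1) (ks ++ [xs.length]) =
      pvSegJoin xs xs.length ks ++ [c] := by
  induction ks with
  | nil =>
    simp only [List.nil_append, pvSegJoin]
    rw [Nat.add_sub_cancel_left]
    simp [List.getElem?_append_right (le_refl xs.length)]
  | cons a tail ih =>
    have ha : a < xs.length := hlt a (by simp)
    cases tail with
    | nil =>
      simp only [List.cons_append, List.nil_append, pvSegJoin]
      rw [Nat.add_sub_cancel_left]
      simp [List.getElem?_append_left ha, List.getElem?_append_right (le_refl xs.length)]
    | cons b rest =>
      have hih := ih (fun x hx => hlt x (List.mem_cons_of_mem a hx))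
      simp only [List.cons_append, pvSegJoin] at hih ⊢
      rw [hih, List.getElem?_append_left ha, List.append_assoc]

theorem pvSegJoin_snoc_q (xs : List Char) (c : Char) (ks : List Nat)
    (hlt : ∀ a ∈ ks, a < xs.length) (hne : ks ≠ []) :
    pvSegJoin (xs ++ [c]) (xs.length + 1) ks =
      pvSegJoin xs xs.length ks ++ [(ks.getLast?.bind (fun k => xs[k]?)).getD '?'] := by
  induction ks with
  | nil => exact absurd rfl hne
  | cons a tail ih =>
    have ha : a < xs.length := hlt a (by simp)
    cases tail with
    | nil =>
      simp only [pvSegJoin, List.getLast?_singleton]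
      rw [List.getElem?_append_left ha]
      have h1 : xs.length + 1 - a = (xs.length - a) + 1 := by omega
      rw [h1, List.replicate_succ']
      simp
    | cons b rest =>
      have hih := ih (fun x hx => hlt x (List.mem_cons_of_mem a hx)) (by simp)
      simp only [pvSegJoin] at hih ⊢
      rw [hih, List.getElem?_append_left ha, List.append_assoc,
        List.getLast?_cons_cons]

-- B's list-level construction
def pvSegCore (xs : List Char) : List Char :=
  match pvKs xs with
  | [] => xs
  | k0 :: _ => List.replicate k0 ((xs[k0]?).getD '?') ++ pvSegJoin xs xs.length (pvKs xs)

theorem pvSegCore_nil (xs : List Char) (h : pvKs xs = []) : pvSegCore xs = xs := by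
  unfold pvSegCore; rw [h]

theorem pvSegCore_cons (xs : List Char) (k0 : Nat) (t : List Nat) (h : pvKs xs = k0 :: t) :
    pvSegCore xs =
      List.replicate k0 ((xs[k0]?).getD '?') ++ pvSegJoin xs xs.length (k0 :: t) := by
  unfold pvSegCore; rw [h]

theorem pvSegCore_eq_pvB (xs : List Char) : pvSegCore xs = pvB xs := by
  induction xs using List.reverseRecOn with
  | nil => rfl
  | append_singleton xs c ih =>
    by_cases hks : pvKs xs = []
    · have hq : ∀ a ∈ xs, a = '?' := (pvKs_nil_iff xs).mp hks
      by_cases hc : c = '?'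
      · have hks' : pvKs (xs ++ [c]) = [] := by
          simp [pvKs_snoc, hc, hks]
        have hq' : ∀ a ∈ xs ++ [c], a = '?' := by
          intro a ha
          rcases List.mem_append.mp ha with h | h
          · exact hq a h
          · rw [List.mem_singleton.mp h]; exact hc
        rw [pvSegCore_nil _ hks', pvB_all_q _ hq']
      · have hks' : pvKs (xs ++ [c]) = [xs.length] := by
          rw [pvKs_snoc, if_neg hc, hks, List.nil_append]
        rw [pvSegCore_cons _ _ _ hks', pvB_snoc_first xs c hq hc]
        simp only [pvSegJoin]
        rw [List.length_append, List.length_singleton, Nat.add_sub_cancel_left]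
        simp [List.getElem?_append_right (le_refl xs.length)]
    · obtain ⟨k0, tail, hk0⟩ := List.exists_cons_of_ne_nil hks
      have hex : ∃ a ∈ xs, a ≠ '?' := by
        by_contra h
        push_neg at h
        exact hks ((pvKs_nil_iff xs).mpr (by simpa using h))
      have hk0lt : k0 < xs.length := pvKs_mem_lt xs k0 (by rw [hk0]; simp)
      have hlt : ∀ a ∈ pvKs xs, a < xs.length := fun a ha => pvKs_mem_lt xs a ha
      have hB : List.replicate k0 ((xs[k0]?).getD '?') ++ pvSegJoin xs xs.length (k0 :: tail)
          = pvB xs := by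
        rw [← pvSegCore_cons _ _ _ hk0, ih]
      by_cases hc : c = '?'
      · have hks' : pvKs (xs ++ [c]) = k0 :: tail := by
          rw [pvKs_snoc, if_pos hc, List.append_nil, hk0]
        rw [pvSegCore_cons _ _ _ hks', pvB_snoc xs c hex, if_pos hc]
        have hlen : (xs ++ [c]).length = xs.length + 1 := by simp
        rw [hlen, ← hk0, pvSegJoin_snoc_q xs c (pvKs xs) hlt hks]
        rw [List.getElem?_append_left hk0lt, pvLastNQ_ks, ← List.append_assoc]
        rw [hk0, hB]
      · have hks' : pvKs (xs ++ [c]) = k0 :: (tail ++ [xs.length]) := by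
          rw [pvKs_snoc, if_neg hc, hk0, List.cons_append]
        rw [pvSegCore_cons _ _ _ hks', pvB_snoc xs c hex, if_neg hc]
        have hlen : (xs ++ [c]).length = xs.length + 1 := by simp
        rw [hlen, ← List.cons_append, ← hk0, pvSegJoin_snoc_known xs c (pvKs xs) hlt]
        rw [List.getElem?_append_left hk0lt, ← List.append_assoc]
        rw [hk0, hB]

theorem fillLine_alt_eq (line : String) : fillLine_alt line = String.ofList (pvB line.toList) := by
  rw [fillLine_alt, ← pvSegCore_eq_pvB, pvSegCore]
  cases hks : pvKs line.toList with
  | nil => simp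
  | cons k0 tail => simp

-- ===== VERDICT (by name: the statement is the Claim_ definition above) =====
theorem fillLine_spec : Claim_equal_fillLine := by
  intro line _
  show _ = _
  rw [fillLine_alt_eq, fillLine, pvLoopInv line.toList line.toList.length (le_refl _)]
  by_cases hq : ∀ c ∈ line.toList.take line.toList.length, c = '?'
  · rw [if_pos hq]
    rw [List.take_length] at hq
    rw [pvB_all_q _ hq]
  · rw [if_neg hq]
    rw [List.take_length, List.drop_length, List.append_nil]
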